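-- pv_equiv track=rewrite | github.com/PlumpMath/lispy-1 | input_handler.py | find_cdr
-- ===== SOURCE A (Python) =====
-- def find_cdr(string):
--     in_inner_block = 0
--     in_string = 0
--
--     for i, val in enumerate(string):
--         if val == '(':
--             in_inner_block += 1
--         if val == ')':
--             in_inner_block -= 1
--         if val == ' ' and in_inner_block <= 0:
--             return i
--     return -1
-- ===== SOURCE B (Python) =====
-- from itertools import accumulate
--
-- def find_cdr(string):
--     depths = list(accumulate((1 if c == '(' else -1 if c == ')' else 0) for c in string))
--     for i, c in enumerate(string):
--         if c == ' ' and depths[i] <= 0: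
--             return i
--     return -1
-- ===== Notes on version B (the rewrite author's own statement) =====
-- stated objective: alternative
-- what changed: Replaced the single-pass inline depth counter with two separate passes: first build a full prefix-depth table with itertools.accumulate, then search for the first space whose tabulated depth is <= 0.
import Mathlib
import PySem

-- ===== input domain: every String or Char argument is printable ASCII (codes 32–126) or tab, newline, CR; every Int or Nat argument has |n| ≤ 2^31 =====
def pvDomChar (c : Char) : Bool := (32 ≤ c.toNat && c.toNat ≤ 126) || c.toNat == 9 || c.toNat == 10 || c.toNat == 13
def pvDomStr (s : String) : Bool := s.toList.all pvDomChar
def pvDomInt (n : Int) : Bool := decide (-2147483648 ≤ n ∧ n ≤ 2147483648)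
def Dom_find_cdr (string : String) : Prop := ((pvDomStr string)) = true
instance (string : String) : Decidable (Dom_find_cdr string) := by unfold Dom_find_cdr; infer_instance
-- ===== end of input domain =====

-- B splits A's inline depth counter into two passes: a prefix-depth table then a search; same cost, alternative decomposition.
-- ===== PORT A =====
-- loop: for i, val in enumerate(string): update in_inner_block, return i on qualifying space
def findCdrLoopA : List Char → Int → Int → Int
  | [], _, _ => -1
  | c :: rest, i, d =>
    let d1 := if c = '(' then d + 1 else d
    let d2 := if c = ')' then d1 - 1 else d1
    if c = ' ' ∧ d2 ≤ 0 then i else findCdrLoopA rest (i + 1) d2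

def find_cdr (string : String) : Int := findCdrLoopA string.toList 0 0

-- ===== PORT B =====
def pvDelta (c : Char) : Int := if c = '(' then 1 else if c = ')' then -1 else 0

-- itertools.accumulate of the deltas: inclusive prefix sums
def pvPrefixDepths : List Char → Int → List Int
  | [], _ => []
  | c :: rest, d => (d + pvDelta c) :: pvPrefixDepths rest (d + pvDelta c)

-- second pass: first index i with string[i] = ' ' and depths[i] ≤ 0
def findCdrLoopB : List (Char × Int) → Int → Int
  | [], _ => -1
  | (c, d) :: rest, i => if c = ' ' ∧ d ≤ 0 then i else findCdrLoopB rest (i + 1)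

def find_cdr_alt (string : String) : Int :=
  findCdrLoopB (string.toList.zip (pvPrefixDepths string.toList 0)) 0

-- ===== PRECONDITION & SPEC =====
def Spec_find_cdr (string : String) (out : Int) : Prop := out = find_cdr_alt string
instance (string : String) (out : Int) : Decidable (Spec_find_cdr string out) := by unfold Spec_find_cdr; infer_instance

-- ===== CLAIM (what is proved, stated in full; the proofs are below) =====
def Claim_equal_find_cdr : Prop := ∀ (string : String), Dom_find_cdr string → Spec_find_cdr string (find_cdr string)

-- ===== LEMMAS AND PROOFS =====
lemma loopA_eq_loopB (cs : List Char) : ∀ (i d : Int),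
    findCdrLoopA cs i d = findCdrLoopB (cs.zip (pvPrefixDepths cs d)) i := by
  induction cs with
  | nil => intro i d; rfl
  | cons c rest ih =>
    intro i d
    have hd : (if c = ')' then (if c = '(' then d + 1 else d) - 1
               else (if c = '(' then d + 1 else d)) = d + pvDelta c := by
      simp only [pvDelta]; split_ifs with h1 h2 <;> simp_all <;> omega
    simp only [findCdrLoopA, findCdrLoopB, pvPrefixDepths, List.zip_cons_cons, hd]
    split_ifs with h
    · rfl
    · exact ih (i + 1) (d + pvDelta c)

-- ===== VERDICT (by name: the statement is the Claim_ definition above) =====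
theorem find_cdr_spec : Claim_equal_find_cdr := by
  intro s _
  unfold Spec_find_cdr find_cdr find_cdr_alt
  exact loopA_eq_loopB s.toList 0 0
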